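-- pv_equiv track=rewrite | github.com/Berteun/adventofcode2022 | day17/day17.py | apply_gust
-- ===== SOURCE A (Python) =====
-- def apply_gust(gust, block, field, dropped):
--     block_top_y = len(field) + len(block) - dropped - 1
--     if gust == '<':
--         # Hitting wall
--         if any(l[0] == '#' for l in block):
--             return block
--         for y in range(len(block)):
--             if block_top_y - y >= len(field):
--                 continue
--             for x in range(len(block[y])):
--                 if block[y][x] == '#' and field[block_top_y - y][x - 1] == '#':
--                     return block
--         # No collission, move
--         return [l[1:] + '.' for l in block]
--     if gust == '>':
--         # Hitting wall
--         if any(l[-1] == '#' for l in block):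
--             return block
--         for y in range(len(block)):
--             if block_top_y - y >= len(field):
--                 continue
--             for x in range(len(block[y])):
--                 if block[y][x] == '#' and field[block_top_y - y][x + 1] == '#':
--                     return block
--         # No collission, move
--         return ['.' + l[:-1] for l in block]
--     assert False
-- ===== SOURCE B (Python) =====
-- def _mask(s):
--     """Bitmask of a row: bit i is set iff s[i] == '#'."""
--     if not s:
--         return 0
--     return (1 if s[0] == '#' else 0) | (_mask(s[1:]) << 1)
--
--
-- def _collides(shifted, field, top):
--     for y, m in enumerate(shifted):
--         fy = top - y
--         if m and fy < len(field) and m & _mask(field[fy]):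
--             return True
--     return False
--
--
-- def apply_gust(gust, block, field, dropped):
--     top = len(field) + len(block) - dropped - 1
--     masks = [_mask(l) for l in block]
--     if gust == '<':
--         if any(m & 1 for m in masks):
--             return block
--         shifted = [m >> 1 for m in masks]
--         moved = [l[1:] + '.' for l in block]
--     elif gust == '>':
--         if any((m >> (len(l) - 1)) & 1 for m, l in zip(masks, block)):
--             return block
--         shifted = [m << 1 for m in masks]
--         moved = ['.' + l[:-1] for l in block]
--     else:
--         assert False
--     return block if _collides(shifted, field, top) else moved
-- ===== Notes on version B (the rewrite author's own statement) =====
-- stated objective: alternative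
-- what changed: B encodes each row as an integer bitmask and detects the wall hit and the field collision with bit shifts and bitwise AND of whole rows (m>>1 / m<<1, m & mask(field_row)), instead of A's nested per-cell character loops indexing the field at x-1/x+1.
-- outside the precondition, e.g. on apply_gust('<', ['.#', '.#'], ['.#', '#'], 3): A returns ['.#', '.#'], B returns ['.#', '.#']
import Mathlib
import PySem

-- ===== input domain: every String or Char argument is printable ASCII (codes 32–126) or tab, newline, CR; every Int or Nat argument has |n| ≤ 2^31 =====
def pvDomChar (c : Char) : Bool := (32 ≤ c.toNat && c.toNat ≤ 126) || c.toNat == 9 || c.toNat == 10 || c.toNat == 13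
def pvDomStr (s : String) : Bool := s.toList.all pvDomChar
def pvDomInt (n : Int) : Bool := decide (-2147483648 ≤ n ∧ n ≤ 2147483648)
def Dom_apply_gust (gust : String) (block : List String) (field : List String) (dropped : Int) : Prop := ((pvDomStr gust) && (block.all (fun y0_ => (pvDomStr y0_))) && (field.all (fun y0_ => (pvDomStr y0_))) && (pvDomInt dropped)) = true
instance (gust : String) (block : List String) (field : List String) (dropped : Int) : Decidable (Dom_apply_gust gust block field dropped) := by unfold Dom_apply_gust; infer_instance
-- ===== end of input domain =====

-- B encodes rows as integer bitmasks and detects the wall hit and the collision with bit shifts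
-- and bitwise AND of whole rows, instead of A's nested per-cell character loops; same value on Pre_.

-- ===== PORT A =====
-- literal transliteration of A: wall check on the edge column, then nested y/x loops indexing
-- the field at block_top_y - y and x∓1 (the early 'return block' = List.any), then the shifted rows.
def apply_gust (gust : String) (block : List String) (field : List String) (dropped : Int) : List String :=
  let btop : Int := (field.length : Int) + (block.length : Int) - dropped - 1
  if gust = "<" then
    if block.any (fun l => PySem.Str.pyGet? l 0 == some '#') then block
    else if (List.range block.length).any (fun y =>
        if (field.length : Int) ≤ btop - (y : Int) then false
        else (List.range (block.getD y "").toList.length).any (fun x =>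
          (PySem.Str.pyGet? (block.getD y "") (x : Int) == some '#') &&
          (PySem.Str.pyGet? (PySem.List.pyGetD field (btop - (y : Int)) "") ((x : Int) - 1) == some '#'))) then block
    else block.map (fun l => PySem.Str.slice l (some 1) none ++ ".")
  else if gust = ">" then
    if block.any (fun l => PySem.Str.pyGet? l (-1) == some '#') then block
    else if (List.range block.length).any (fun y =>
        if (field.length : Int) ≤ btop - (y : Int) then false
        else (List.range (block.getD y "").toList.length).any (fun x =>
          (PySem.Str.pyGet? (block.getD y "") (x : Int) == some '#') &&
          (PySem.Str.pyGet? (PySem.List.pyGetD field (btop - (y : Int)) "") ((x : Int) + 1) == some '#'))) then block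
    else block.map (fun l => "." ++ PySem.Str.slice l none (some (-1)))
  else []  -- Python: assert False (unreachable under Pre_)

-- ===== PORT B =====
-- transliteration of Source B: _mask builds the row bitmask recursively (bit i set iff s[i] == '#'),
-- _collides ANDs each (nonzero) shifted row mask with the mask of its field row.
def pvMask : List Char → Nat
  | [] => 0
  | c :: t => (if c = '#' then 1 else 0) ||| (pvMask t <<< 1)

def pvCollides (shifted : List Nat) (field : List String) (top : Int) : Bool :=
  (PySem.List.enumerate shifted 0).any (fun p =>
    p.2 != 0 && decide (top - p.1 < (field.length : Int)) &&
      (p.2 &&& pvMask (PySem.List.pyGetD field (top - p.1) "").toList != 0))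

def apply_gust_alt (gust : String) (block : List String) (field : List String) (dropped : Int) : List String :=
  let top : Int := (field.length : Int) + (block.length : Int) - dropped - 1
  let masks : List Nat := block.map (fun l => pvMask l.toList)
  if gust = "<" then
    if masks.any (fun m => m &&& 1 != 0) then block
    else
      let shifted := masks.map (fun m => m >>> 1)
      let moved := block.map (fun l => PySem.Str.slice l (some 1) none ++ ".")
      if pvCollides shifted field top then block else moved
  else if gust = ">" then
    if (masks.zip block).any (fun p => (p.1 >>> (p.2.toList.length - 1)) &&& 1 != 0) then block
    else
      let shifted := masks.map (fun m => m <<< 1)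
      let moved := block.map (fun l => "." ++ PySem.Str.slice l none (some (-1)))
      if pvCollides shifted field top then block else moved
  else []  -- Python: assert False (unreachable under Pre_)

-- ===== PRECONDITION & SPEC =====
-- Pre_ excludes the inputs where Python A raises (gust not '<'/'>', an empty block row, a field
-- access out of range) and, conservatively, non-wall-hit inputs whose '#'-carrying block rows face
-- a missing or too-short field row even when A happens to return early (a collision found on an
-- earlier row) before the raising access would run — on those excluded-but-returning inputs both
-- programs return the same value (see claim cites).
def Pre_apply_gust (gust : String) (block : List String) (field : List String) (dropped : Int) : Prop :=
  (gust = "<" ∨ gust = ">") ∧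
  (∀ l ∈ block, l ≠ "") ∧
  ((if gust = "<" then ∃ l ∈ block, l.toList[0]? = some '#'
    else ∃ l ∈ block, l.toList.getLast? = some '#') ∨
   (∀ y < block.length,
    '#' ∈ (block.getD y "").toList →
    (field.length : Int) + block.length - dropped - 1 - y < field.length →
    (-(field.length : Int) ≤ (field.length : Int) + block.length - dropped - 1 - y ∧
     (block.getD y "").toList.length ≤
       (PySem.List.pyGetD field ((field.length : Int) + block.length - dropped - 1 - y) "").toList.length)))
instance (gust : String) (block : List String) (field : List String) (dropped : Int) : Decidable (Pre_apply_gust gust block field dropped) := by unfold Pre_apply_gust; infer_instance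

def pvWitness_apply_gust : String × List String × List String × Int := ("<", [".#"], ["...."], 1)

def Spec_apply_gust (gust : String) (block : List String) (field : List String) (dropped : Int) (out : List String) : Prop := out = apply_gust_alt gust block field dropped
instance (gust : String) (block : List String) (field : List String) (dropped : Int) (out : List String) : Decidable (Spec_apply_gust gust block field dropped out) := by unfold Spec_apply_gust; infer_instance

-- ===== CLAIM (what is proved, stated in full; the proofs are below) =====
def Claim_equal_apply_gust : Prop := ∀ (gust : String) (block : List String) (field : List String) (dropped : Int), Dom_apply_gust gust block field dropped → Pre_apply_gust gust block field dropped → Spec_apply_gust gust block field dropped (apply_gust gust block field dropped)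

-- ===== LEMMAS AND PROOFS =====

lemma pv_testBit_mask (a : List Char) (j : Nat) :
    (pvMask a).testBit j = (a[j]? == some '#') := by
  induction a generalizing j with
  | nil => simp [pvMask]
  | cons c t ih =>
    cases j with
    | zero =>
      by_cases hc : c = '#' <;>
        simp [pvMask, hc]
    | succ k =>
      have h1 : (if c = '#' then (1:Nat) else 0).testBit (k+1) = false := by
        by_cases hc : c = '#' <;> simp [hc, Nat.testBit_succ]
      simp [pvMask, Nat.testBit_or, Nat.testBit_shiftLeft, h1, ih]

lemma pv_land_ne_zero (m n : Nat) :
    (m &&& n ≠ 0) ↔ ∃ i, m.testBit i = true ∧ n.testBit i = true := by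
  constructor
  · intro h
    by_contra hno
    apply h
    apply Nat.eq_of_testBit_eq
    intro i
    rw [Nat.testBit_and, Nat.zero_testBit]
    by_cases hm : m.testBit i
    · by_cases hn : n.testBit i
      · exact absurd ⟨i, hm, hn⟩ hno
      · simp [Bool.eq_false_iff.2 hn]
    · simp [Bool.eq_false_iff.2 hm]
  · rintro ⟨i, h1, h2⟩ h0
    have := congrArg (fun x => Nat.testBit x i) h0
    simp [Nat.testBit_and, h1, h2] at this

lemma pv_rowL_mask (r f : List Char) (hhead : ¬ r[0]? = some '#') :
    ((List.range r.length).any (fun x =>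
      (r[x]? == some '#') && (PySem.List.pyGet? f ((x : Int) - 1) == some '#')))
    = ((pvMask r >>> 1) &&& pvMask f != 0) := by
  rw [Bool.eq_iff_iff, List.any_eq_true, bne_iff_ne, pv_land_ne_zero]
  constructor
  · rintro ⟨x, hx, hb⟩
    rw [List.mem_range] at hx
    rw [Bool.and_eq_true, beq_iff_eq, beq_iff_eq] at hb
    obtain ⟨h1, h2⟩ := hb
    match x, hx, h1, h2 with
    | 0, hx, h1, h2 => exact absurd h1 hhead
    | (k+1), hx, h1, h2 =>
      have hcast : ((k+1 : Nat) : Int) - 1 = ((k : Nat) : Int) := by push_cast; ring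
      rw [hcast, PySem.List.pyGet?_natCast] at h2
      refine ⟨k, ?_, ?_⟩
      · rw [Nat.testBit_shiftRight, pv_testBit_mask, Nat.add_comm, h1]; rfl
      · rw [pv_testBit_mask, h2]; rfl
  · rintro ⟨i, h1, h2⟩
    rw [Nat.testBit_shiftRight, pv_testBit_mask, beq_iff_eq] at h1
    rw [pv_testBit_mask, beq_iff_eq] at h2
    have hlt : 1 + i < r.length := (List.getElem?_eq_some_iff.1 h1).1
    refine ⟨i + 1, List.mem_range.2 (by omega), ?_⟩
    rw [Bool.and_eq_true, beq_iff_eq, beq_iff_eq]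
    constructor
    · rw [Nat.add_comm] at h1; exact h1
    · have hcast : ((i+1 : Nat) : Int) - 1 = ((i : Nat) : Int) := by push_cast; ring
      rw [hcast, PySem.List.pyGet?_natCast]; exact h2

lemma pv_rowR_mask (r f : List Char) :
    ((List.range r.length).any (fun x =>
      (r[x]? == some '#') && (PySem.List.pyGet? f ((x : Int) + 1) == some '#')))
    = ((pvMask r <<< 1) &&& pvMask f != 0) := by
  rw [Bool.eq_iff_iff, List.any_eq_true, bne_iff_ne, pv_land_ne_zero]
  constructor
  · rintro ⟨x, hx, hb⟩
    rw [List.mem_range] at hx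
    rw [Bool.and_eq_true, beq_iff_eq, beq_iff_eq] at hb
    obtain ⟨h1, h2⟩ := hb
    have hcast : ((x : Nat) : Int) + 1 = ((x + 1 : Nat) : Int) := by push_cast; ring
    rw [hcast, PySem.List.pyGet?_natCast] at h2
    refine ⟨x + 1, ?_, ?_⟩
    · rw [Nat.testBit_shiftLeft, pv_testBit_mask]
      simp [h1]
    · rw [pv_testBit_mask, h2]; rfl
  · rintro ⟨i, h1, h2⟩
    rw [Nat.testBit_shiftLeft, Bool.and_eq_true, decide_eq_true_iff, pv_testBit_mask, beq_iff_eq] at h1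
    obtain ⟨hi1, h1⟩ := h1
    rw [pv_testBit_mask, beq_iff_eq] at h2
    have hlt : i - 1 < r.length := (List.getElem?_eq_some_iff.1 h1).1
    refine ⟨i - 1, List.mem_range.2 hlt, ?_⟩
    rw [Bool.and_eq_true, beq_iff_eq, beq_iff_eq]
    refine ⟨h1, ?_⟩
    have hcast : ((i - 1 : Nat) : Int) + 1 = ((i : Nat) : Int) := by omega
    rw [hcast, PySem.List.pyGet?_natCast]; exact h2

lemma pv_strGet_zero (l : String) : PySem.Str.pyGet? l 0 = l.toList[0]? := by
  simp [PySem.Str.pyGet?, PySem.List.pyGet?_zero]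

lemma pv_strGet_neg_one (l : String) : PySem.Str.pyGet? l (-1) = l.toList.getLast? := by
  simp [PySem.Str.pyGet?, PySem.List.pyGet?_neg_one]

-- the '<' wall: bit 0 of the row mask is the first character
lemma pv_and_one (m : Nat) : (m &&& 1 != 0) = m.testBit 0 := by
  rw [Nat.and_one_is_mod, Nat.testBit_zero]
  rcases Nat.mod_two_eq_zero_or_one m with h | h <;> simp [h]

lemma pv_wallL (block : List String) :
    ((block.map (fun l => pvMask l.toList)).any (fun m => m &&& 1 != 0))
    = block.any (fun l => PySem.Str.pyGet? l 0 == some '#') := by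
  rw [List.any_map]
  apply PySem.List.any_congr_mem
  intro l _
  dsimp only [Function.comp]
  rw [pv_and_one, pv_testBit_mask, pv_strGet_zero]

lemma pv_zip_map_self {α β : Type} (f : α → β) (xs : List α) :
    (xs.map f).zip xs = xs.map (fun a => (f a, a)) := by
  induction xs with
  | nil => rfl
  | cons a t ih => simp [ih]

-- the '>' wall: bit (len-1) of the row mask is the last character
lemma pv_wallR (block : List String) :
    (((block.map (fun l => pvMask l.toList)).zip block).any
        (fun p => (p.1 >>> (p.2.toList.length - 1)) &&& 1 != 0))
    = block.any (fun l => PySem.Str.pyGet? l (-1) == some '#') := by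
  rw [pv_zip_map_self, List.any_map]
  apply PySem.List.any_congr_mem
  intro l _
  dsimp only [Function.comp, id]
  rw [pv_and_one, Nat.testBit_shiftRight, Nat.add_zero, pv_testBit_mask,
    pv_strGet_neg_one, List.getLast?_eq_getElem?]

lemma pv_enum_any (xs : List Nat) (f : Int × Nat → Bool) :
    (PySem.List.enumerate xs 0).any f
      = (List.range xs.length).any (fun k => f ((k : Int), xs.getD k 0)) := by
  rw [PySem.List.enumerate_eq_map_pyRange xs 0]
  rw [PySem.List.len_eq, PySem.List.pyRange_zero_natCast, List.any_map, List.any_map]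
  apply PySem.List.any_congr_mem
  intro k _
  simp

-- per-row: A's guarded inner scan equals Source B's 'm and fy < len(field) and m & mask(field[fy])'
lemma pv_row_guard (m maskf : Nat) (glen : Prop) [Decidable glen] (inner : Bool)
    (hinner : (¬ glen) → inner = (m &&& maskf != 0)) :
    (if glen then false else inner)
    = (m != 0 && decide (¬ glen) && (m &&& maskf != 0)) := by
  by_cases hg : glen
  · simp [hg]
  · rw [if_neg hg, hinner hg]
    by_cases hz : m = 0
    · subst hz; simp
    · simp [hz]
      exact fun _ => hg

lemma pv_outerL (btop : Int) (block field : List String)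
    (hwall : ∀ l ∈ block, ¬ l.toList[0]? = some '#') :
    ((List.range block.length).any (fun y =>
        if (field.length : Int) ≤ btop - (y : Int) then false
        else (List.range (block.getD y "").toList.length).any (fun x =>
          (PySem.Str.pyGet? (block.getD y "") (x : Int) == some '#') &&
          (PySem.Str.pyGet? (PySem.List.pyGetD field (btop - (y : Int)) "") ((x : Int) - 1) == some '#'))))
    = pvCollides ((block.map (fun l => pvMask l.toList)).map (fun m => m >>> 1)) field btop := by
  unfold pvCollides
  rw [pv_enum_any, List.length_map, List.length_map]
  apply PySem.List.any_congr_mem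
  intro y hy
  rw [List.mem_range] at hy
  dsimp only
  have hgd : ((block.map (fun l => pvMask l.toList)).map (fun m => m >>> 1)).getD y 0
      = pvMask (block.getD y "").toList >>> 1 := by
    rw [List.getD_eq_getElem _ _ (by simpa using hy), List.getElem_map, List.getElem_map,
      List.getD_eq_getElem _ _ hy]
  rw [hgd]
  have hmem : block.getD y "" ∈ block := by
    rw [List.getD_eq_getElem _ _ hy]; exact List.getElem_mem hy
  have hres := pv_row_guard (pvMask (block.getD y "").toList >>> 1)
      (pvMask (PySem.List.pyGetD field (btop - (y : Int)) "").toList)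
      ((field.length : Int) ≤ btop - (y : Int))
      ((List.range (block.getD y "").toList.length).any (fun x =>
          (PySem.Str.pyGet? (block.getD y "") (x : Int) == some '#') &&
          (PySem.Str.pyGet? (PySem.List.pyGetD field (btop - (y : Int)) "") ((x : Int) - 1) == some '#')))
      (fun _ => by
        have := pv_rowL_mask (block.getD y "").toList
            (PySem.List.pyGetD field (btop - (y : Int)) "").toList (hwall _ hmem)
        simpa [PySem.Str.pyGet?, PySem.Chars.pyGet?_eq_listPyGet?, PySem.List.pyGet?_natCast] using this)
  rw [hres]
  congr 2
  rw [decide_eq_decide]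
  omega

lemma pv_outerR (btop : Int) (block field : List String) :
    ((List.range block.length).any (fun y =>
        if (field.length : Int) ≤ btop - (y : Int) then false
        else (List.range (block.getD y "").toList.length).any (fun x =>
          (PySem.Str.pyGet? (block.getD y "") (x : Int) == some '#') &&
          (PySem.Str.pyGet? (PySem.List.pyGetD field (btop - (y : Int)) "") ((x : Int) + 1) == some '#'))))
    = pvCollides ((block.map (fun l => pvMask l.toList)).map (fun m => m <<< 1)) field btop := by
  unfold pvCollides
  rw [pv_enum_any, List.length_map, List.length_map]
  apply PySem.List.any_congr_mem
  intro y hy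
  rw [List.mem_range] at hy
  dsimp only
  have hgd : ((block.map (fun l => pvMask l.toList)).map (fun m => m <<< 1)).getD y 0
      = pvMask (block.getD y "").toList <<< 1 := by
    rw [List.getD_eq_getElem _ _ (by simpa using hy), List.getElem_map, List.getElem_map,
      List.getD_eq_getElem _ _ hy]
  rw [hgd]
  have hres := pv_row_guard (pvMask (block.getD y "").toList <<< 1)
      (pvMask (PySem.List.pyGetD field (btop - (y : Int)) "").toList)
      ((field.length : Int) ≤ btop - (y : Int))
      ((List.range (block.getD y "").toList.length).any (fun x =>
          (PySem.Str.pyGet? (block.getD y "") (x : Int) == some '#') &&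
          (PySem.Str.pyGet? (PySem.List.pyGetD field (btop - (y : Int)) "") ((x : Int) + 1) == some '#')))
      (fun _ => by
        have := pv_rowR_mask (block.getD y "").toList
            (PySem.List.pyGetD field (btop - (y : Int)) "").toList
        simpa [PySem.Str.pyGet?, PySem.Chars.pyGet?_eq_listPyGet?, PySem.List.pyGet?_natCast] using this)
  rw [hres]
  congr 2
  rw [decide_eq_decide]
  omega

-- ===== VERDICT (by name: the statement is the Claim_ definition above) =====
theorem apply_gust_spec : Claim_equal_apply_gust := by
  intro gust block field dropped _ hpre
  obtain ⟨hg, -, -⟩ := hpre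
  unfold Spec_apply_gust
  rcases hg with rfl | rfl
  · simp only [apply_gust, apply_gust_alt, reduceIte]
    rw [pv_wallL]
    by_cases hw : block.any (fun l => PySem.Str.pyGet? l 0 == some '#') = true
    · simp only [hw, reduceIte]
    · rw [Bool.not_eq_true] at hw
      simp only [hw, Bool.false_eq_true, if_false]
      have hwall : ∀ l ∈ block, ¬ l.toList[0]? = some '#' := by
        rw [List.any_eq_false] at hw
        intro l hl
        have := hw l hl
        simpa [pv_strGet_zero, PySem.Str.pyGet?, PySem.Chars.pyGet?_eq_listPyGet?, PySem.List.pyGet?_zero] using this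
      rw [pv_outerL ((field.length : Int) + (block.length : Int) - dropped - 1) block field hwall]
  · simp only [apply_gust, apply_gust_alt, String.reduceEq, reduceIte]
    rw [pv_wallR]
    by_cases hw : block.any (fun l => PySem.Str.pyGet? l (-1) == some '#') = true
    · simp only [hw, reduceIte]
    · rw [Bool.not_eq_true] at hw
      simp only [hw, Bool.false_eq_true, if_false]
      rw [pv_outerR ((field.length : Int) + (block.length : Int) - dropped - 1) block field]
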